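-- pv_equiv track=rewrite | github.com/facebookresearch/PyTorch-BigGraph | torchbiggraph/util.py | create_partition_pairs_for_one_layer
-- ===== SOURCE A (Python) =====
-- from itertools import zip_longest
--
-- def create_partition_pairs_for_one_layer(nparts_lhs, nparts_rhs, layer_idx):
--     """Create one layer of pairs of tuples to be used by the 'inside_out' and
--     'outside_in' modes of create_partition_pairs().
--     """
--
--     corner_pair = (layer_idx, layer_idx)
--     pairs_forming_row = [
--         (layer_idx, column_idx) for column_idx
--         in range(layer_idx + 1, nparts_rhs)
--     ]
--     pairs_forming_column = [
--         (row_idx, layer_idx) for row_idx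
--         in range(layer_idx + 1, nparts_lhs)
--     ]
--     raw_row_and_column_pairs = [
--         val
--         for pair in zip_longest(pairs_forming_row, pairs_forming_column)
--         for val in pair
--     ]
--     return [corner_pair] + \
--         [pair for pair in raw_row_and_column_pairs if pair is not None]
-- ===== SOURCE B (Python) =====
-- def create_partition_pairs_for_one_layer(nparts_lhs, nparts_rhs, layer_idx):
--     """Create one layer of pairs of tuples to be used by the 'inside_out' and
--     'outside_in' modes of create_partition_pairs().
--     """
--     pairs = [(layer_idx, layer_idx)]
--     for idx in range(layer_idx + 1, max(nparts_lhs, nparts_rhs)):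
--         if idx < nparts_rhs:
--             pairs.append((layer_idx, idx))
--         if idx < nparts_lhs:
--             pairs.append((idx, layer_idx))
--     return pairs
-- ===== Notes on version B (the rewrite author's own statement) =====
-- stated objective: simpler
-- what changed: Replaces the two intermediate comprehension lists, the zip_longest interleaving with None padding and the final None-filter by a single loop over one index range that conditionally appends the row pair and the column pair at each offset (one pass, no intermediate lists or None sentinels).
import Mathlib
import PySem

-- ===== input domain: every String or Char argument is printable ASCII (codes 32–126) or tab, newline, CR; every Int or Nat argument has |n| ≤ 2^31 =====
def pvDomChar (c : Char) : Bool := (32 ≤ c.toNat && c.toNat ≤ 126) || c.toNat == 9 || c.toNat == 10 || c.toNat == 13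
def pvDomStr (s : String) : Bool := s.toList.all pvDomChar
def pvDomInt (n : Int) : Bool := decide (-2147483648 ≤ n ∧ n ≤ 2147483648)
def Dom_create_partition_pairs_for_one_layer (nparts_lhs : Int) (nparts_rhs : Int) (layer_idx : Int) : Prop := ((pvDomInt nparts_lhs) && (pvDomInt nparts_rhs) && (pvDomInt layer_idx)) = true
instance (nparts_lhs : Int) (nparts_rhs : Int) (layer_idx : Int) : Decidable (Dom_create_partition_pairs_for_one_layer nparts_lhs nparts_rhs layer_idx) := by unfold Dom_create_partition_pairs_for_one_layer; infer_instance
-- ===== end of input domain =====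

-- B replaces the zip_longest + flatten + None-filter pipeline by one loop that
-- conditionally appends the row pair and the column pair at each offset (objective: simpler).

-- ===== PORT A =====
-- itertools.zip_longest(xs, ys) with the default fillvalue None
def pvZipLongest {α β : Type} : List α → List β → List (Option α × Option β)
  | [], [] => []
  | x :: xs, [] => (some x, none) :: pvZipLongest xs []
  | [], y :: ys => (none, some y) :: pvZipLongest [] ys
  | x :: xs, y :: ys => (some x, some y) :: pvZipLongest xs ys

def create_partition_pairs_for_one_layer (nparts_lhs : Int) (nparts_rhs : Int) (layer_idx : Int) : List (Int × Int) :=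
  let corner_pair : Int × Int := (layer_idx, layer_idx)
  let pairs_forming_row : List (Int × Int) :=
    (PySem.List.pyRange (layer_idx + 1) nparts_rhs 1).map (fun column_idx => (layer_idx, column_idx))
  let pairs_forming_column : List (Int × Int) :=
    (PySem.List.pyRange (layer_idx + 1) nparts_lhs 1).map (fun row_idx => (row_idx, layer_idx))
  let raw_row_and_column_pairs : List (Option (Int × Int)) :=
    (pvZipLongest pairs_forming_row pairs_forming_column).flatMap (fun pair => [pair.1, pair.2])
  [corner_pair] ++ raw_row_and_column_pairs.filterMap id  -- keep exactly the pairs that are not None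

-- ===== PORT B =====
def create_partition_pairs_for_one_layer_alt (nparts_lhs : Int) (nparts_rhs : Int) (layer_idx : Int) : List (Int × Int) :=
  (PySem.List.pyRange (layer_idx + 1) (max nparts_lhs nparts_rhs) 1).foldl
    (fun pairs idx =>
      let pairs := if idx < nparts_rhs then pairs ++ [(layer_idx, idx)] else pairs
      if idx < nparts_lhs then pairs ++ [(idx, layer_idx)] else pairs)
    [(layer_idx, layer_idx)]

-- ===== PRECONDITION & SPEC =====
def Spec_create_partition_pairs_for_one_layer (nparts_lhs : Int) (nparts_rhs : Int) (layer_idx : Int) (out : List (Int × Int)) : Prop := out = create_partition_pairs_for_one_layer_alt nparts_lhs nparts_rhs layer_idx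
instance (nparts_lhs : Int) (nparts_rhs : Int) (layer_idx : Int) (out : List (Int × Int)) : Decidable (Spec_create_partition_pairs_for_one_layer nparts_lhs nparts_rhs layer_idx out) := by unfold Spec_create_partition_pairs_for_one_layer; infer_instance

-- ===== CLAIM (what is proved, stated in full; the proofs are below) =====
def Claim_equal_create_partition_pairs_for_one_layer : Prop := ∀ (nparts_lhs : Int) (nparts_rhs : Int) (layer_idx : Int), Dom_create_partition_pairs_for_one_layer nparts_lhs nparts_rhs layer_idx → Spec_create_partition_pairs_for_one_layer nparts_lhs nparts_rhs layer_idx (create_partition_pairs_for_one_layer nparts_lhs nparts_rhs layer_idx)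

-- ===== LEMMAS AND PROOFS =====

-- B's loop body written as one extension, so that foldl_append_eq_flatMap applies
def pvStep (nl nr l : Int) (idx : Int) : List (Int × Int) :=
  (if idx < nr then [(l, idx)] else []) ++ (if idx < nl then [(idx, l)] else [])

theorem pv_alt_foldl (nl nr l : Int) (lst : List Int) (acc : List (Int × Int)) :
    lst.foldl (fun pairs idx =>
      let pairs := if idx < nr then pairs ++ [(l, idx)] else pairs
      if idx < nl then pairs ++ [(idx, l)] else pairs) acc
    = acc ++ lst.flatMap (pvStep nl nr l) := by
  induction lst generalizing acc with
  | nil => simp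
  | cons x xs ih =>
      simp only [List.foldl_cons, List.flatMap_cons, ih, pvStep]
      split_ifs <;> simp

-- A's interleaving, characterised on tails of the ranges
theorem pv_interleave (nl nr l : Int) (a : Int) :
    ((pvZipLongest ((PySem.List.pyRange a nr 1).map (fun c => (l, c)))
                   ((PySem.List.pyRange a nl 1).map (fun r => (r, l)))).flatMap
       (fun pair => [pair.1, pair.2])).filterMap id
    = (PySem.List.pyRange a (max nl nr) 1).flatMap (pvStep nl nr l) := by
  by_cases hm : max nl nr ≤ a
  · rw [PySem.List.pyRange_one_eq_nil hm,
        PySem.List.pyRange_one_eq_nil (le_trans (le_max_left nl nr) hm),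
        PySem.List.pyRange_one_eq_nil (le_trans (le_max_right nl nr) hm)]
    simp [pvZipLongest]
  · have h : a < max nl nr := by omega
    rw [PySem.List.pyRange_one_cons h]
    by_cases hr : a < nr <;> by_cases hl : a < nl
    · rw [PySem.List.pyRange_one_cons hr, PySem.List.pyRange_one_cons hl]
      simp only [List.map_cons, pvZipLongest, List.flatMap_cons]
      rw [List.filterMap_append, pv_interleave nl nr l (a + 1)]
      simp [pvStep, hr, hl]
    · rw [PySem.List.pyRange_one_cons hr, PySem.List.pyRange_one_eq_nil (show nl ≤ a by omega)]
      simp only [List.map_cons, List.map_nil, pvZipLongest, List.flatMap_cons]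
      have hrec := pv_interleave nl nr l (a + 1)
      rw [PySem.List.pyRange_one_eq_nil (show nl ≤ a + 1 by omega), List.map_nil] at hrec
      rw [List.filterMap_append, hrec]
      simp [pvStep, hr, hl]
    · rw [PySem.List.pyRange_one_cons hl, PySem.List.pyRange_one_eq_nil (show nr ≤ a by omega)]
      simp only [List.map_cons, List.map_nil, pvZipLongest, List.flatMap_cons]
      have hrec := pv_interleave nl nr l (a + 1)
      rw [PySem.List.pyRange_one_eq_nil (show nr ≤ a + 1 by omega), List.map_nil] at hrec
      rw [List.filterMap_append, hrec]
      simp [pvStep, hr, hl]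
    · omega
termination_by ((max nl nr) - a).toNat
decreasing_by all_goals omega

-- ===== VERDICT (by name: the statement is the Claim_ definition above) =====
theorem create_partition_pairs_for_one_layer_spec : Claim_equal_create_partition_pairs_for_one_layer := by
  intro nl nr l _
  unfold Spec_create_partition_pairs_for_one_layer
  unfold create_partition_pairs_for_one_layer create_partition_pairs_for_one_layer_alt
  dsimp only
  rw [pv_alt_foldl, pv_interleave]
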